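-- pv_equiv track=rewrite | github.com/phintaC/GS_phage_2020 | annotate.py | regionCount
-- ===== SOURCE A (Python) =====
-- def regionCount(datamatrix):
-- 	''' Count number of samples from each region '''
-- 	africa, asia, europe, mideast, oceania, namerica, samerica = 0,0,0,0,0,0,0
-- 	for row in datamatrix:
-- 		if row[1] == "Africa":
-- 			africa += 1
-- 		elif row[1] == "Asia":
-- 			asia += 1
-- 		elif row[1] == "Europe":
-- 			europe += 1
-- 		elif row[1] == "Middle East":
-- 			mideast += 1
-- 		elif row[1] == "North America":
-- 			namerica += 1
-- 		elif row[1] == "Oceania":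
-- 			oceania += 1
-- 		elif row[1] == "South America":
-- 			samerica += 1
--
-- 	return africa,asia,europe,mideast,namerica,oceania,samerica
-- ===== SOURCE B (Python) =====
-- def regionCount(datamatrix):
-- 	''' Count number of samples from each region '''
-- 	names = ("Africa", "Asia", "Europe", "Middle East",
-- 	         "North America", "Oceania", "South America")
-- 	return tuple(sum(1 for row in datamatrix if row[1] == name) for name in names)
-- ===== Notes on version B (the rewrite author's own statement) =====
-- stated objective: alternative
-- what changed: Replaces the single loop with a seven-way elif ladder over seven scalar counters by seven independent branch-free counting passes (sum of a comparison per region name), read out in the required tuple order.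
import Mathlib
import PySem

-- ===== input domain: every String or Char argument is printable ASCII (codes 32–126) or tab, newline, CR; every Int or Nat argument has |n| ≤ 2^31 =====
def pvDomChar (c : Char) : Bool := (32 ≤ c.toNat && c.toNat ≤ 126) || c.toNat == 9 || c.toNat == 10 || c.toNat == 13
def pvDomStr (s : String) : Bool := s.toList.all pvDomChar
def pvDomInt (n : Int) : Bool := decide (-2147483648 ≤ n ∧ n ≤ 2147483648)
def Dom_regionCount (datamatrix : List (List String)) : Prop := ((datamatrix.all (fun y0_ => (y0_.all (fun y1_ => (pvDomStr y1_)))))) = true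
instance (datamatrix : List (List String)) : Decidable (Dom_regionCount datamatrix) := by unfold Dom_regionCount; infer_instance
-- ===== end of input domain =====

-- ===== PORT A =====
-- B replaces A's one loop with seven-way elif ladder by seven independent counting passes; equal return value on rows of length >= 2.
def regionStepA (s : Int × Int × Int × Int × Int × Int × Int) (row : List String) :
    Int × Int × Int × Int × Int × Int × Int :=
  match s with
  | (africa, asia, europe, mideast, oceania, namerica, samerica) =>
    match PySem.List.pyGet? row 1 with
    | none => (africa, asia, europe, mideast, oceania, namerica, samerica)  -- Python raises IndexError here; excluded by Pre_
    | some v =>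
      if v = "Africa" then (africa + 1, asia, europe, mideast, oceania, namerica, samerica)
      else if v = "Asia" then (africa, asia + 1, europe, mideast, oceania, namerica, samerica)
      else if v = "Europe" then (africa, asia, europe + 1, mideast, oceania, namerica, samerica)
      else if v = "Middle East" then (africa, asia, europe, mideast + 1, oceania, namerica, samerica)
      else if v = "North America" then (africa, asia, europe, mideast, oceania, namerica + 1, samerica)
      else if v = "Oceania" then (africa, asia, europe, mideast, oceania + 1, namerica, samerica)
      else if v = "South America" then (africa, asia, europe, mideast, oceania, namerica, samerica + 1)
      else (africa, asia, europe, mideast, oceania, namerica, samerica)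

def regionCount (datamatrix : List (List String)) : Int × Int × Int × Int × Int × Int × Int :=
  match datamatrix.foldl regionStepA (0, 0, 0, 0, 0, 0, 0) with
  | (africa, asia, europe, mideast, oceania, namerica, samerica) =>
    (africa, asia, europe, mideast, namerica, oceania, samerica)

-- ===== PORT B =====
-- sum(1 for row in datamatrix if row[1] == name)
def countRegion (datamatrix : List (List String)) (name : String) : Int :=
  datamatrix.foldl (fun acc row => if PySem.List.pyGet? row 1 = some name then acc + 1 else acc) 0

def regionCount_alt (datamatrix : List (List String)) : Int × Int × Int × Int × Int × Int × Int :=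
  (countRegion datamatrix "Africa", countRegion datamatrix "Asia", countRegion datamatrix "Europe",
   countRegion datamatrix "Middle East", countRegion datamatrix "North America",
   countRegion datamatrix "Oceania", countRegion datamatrix "South America")

-- ===== PRECONDITION & SPEC =====
-- A evaluates row[1] on every row: rows shorter than 2 raise IndexError, so exactly those inputs are excluded.
def Pre_regionCount (datamatrix : List (List String)) : Prop :=
  ∀ row ∈ datamatrix, 2 ≤ row.length
instance (datamatrix : List (List String)) : Decidable (Pre_regionCount datamatrix) := by unfold Pre_regionCount; infer_instance
def pvWitness_regionCount : List (List String) := [["s1", "Asia"], ["s2", "Africa"], ["s3", "Mars"]]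
def Spec_regionCount (datamatrix : List (List String)) (out : Int × Int × Int × Int × Int × Int × Int) : Prop := out = regionCount_alt datamatrix
instance (datamatrix : List (List String)) (out : Int × Int × Int × Int × Int × Int × Int) : Decidable (Spec_regionCount datamatrix out) := by unfold Spec_regionCount; infer_instance

-- ===== CLAIM (what is proved, stated in full; the proofs are below) =====
def Claim_equal_regionCount : Prop := ∀ (datamatrix : List (List String)), Dom_regionCount datamatrix → Pre_regionCount datamatrix → Spec_regionCount datamatrix (regionCount datamatrix)

-- ===== LEMMAS AND PROOFS =====

theorem countRegion_shift (d : List (List String)) (name : String) :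
    ∀ x : Int,
    d.foldl (fun acc row => if PySem.List.pyGet? row 1 = some name then acc + 1 else acc) x =
      x + d.foldl (fun acc row => if PySem.List.pyGet? row 1 = some name then acc + 1 else acc) 0 := by
  induction d with
  | nil => intro x; simp
  | cons row d ih =>
    intro x
    rw [List.foldl_cons, List.foldl_cons,
        ih (if PySem.List.pyGet? row 1 = some name then x + 1 else x),
        ih (if PySem.List.pyGet? row 1 = some name then (0 : Int) + 1 else 0)]
    split_ifs <;> ring

theorem countRegion_cons (row : List String) (d : List (List String)) (name : String) :
    countRegion (row :: d) name =
      (if PySem.List.pyGet? row 1 = some name then 1 else 0) + countRegion d name := by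
  unfold countRegion
  rw [List.foldl_cons, countRegion_shift d name]
  split_ifs <;> ring

theorem pyGet?_one (x y : String) (t : List String) :
    PySem.List.pyGet? (x :: y :: t) 1 = some y := by
  simp [PySem.List.pyGet?, PySem.List.pyIdx?]

theorem foldA_eq (d : List (List String)) :
    ∀ (a b c m o n s : Int), (∀ row ∈ d, 2 ≤ row.length) →
    d.foldl regionStepA (a, b, c, m, o, n, s) =
      (a + countRegion d "Africa", b + countRegion d "Asia", c + countRegion d "Europe",
       m + countRegion d "Middle East", o + countRegion d "Oceania",
       n + countRegion d "North America", s + countRegion d "South America") := by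
  induction d with
  | nil => intro a b c m o n s _; simp [countRegion]
  | cons row d ih =>
    intro a b c m o n s hpre
    have hrow : 2 ≤ row.length := hpre row (List.mem_cons_self ..)
    have hd : ∀ r ∈ d, 2 ≤ r.length := fun r hr => hpre r (List.mem_cons_of_mem _ hr)
    obtain ⟨v, hv⟩ : ∃ v, PySem.List.pyGet? row 1 = some v := by
      match row, hrow with
      | x :: y :: t, _ => exact ⟨y, pyGet?_one x y t⟩
    simp only [List.foldl_cons, regionStepA, hv, countRegion_cons, Option.some.injEq]
    split_ifs <;> rw [ih _ _ _ _ _ _ _ hd] <;> simp only [Prod.mk.injEq] <;> and_intros <;> first | ring1 | (subst_vars; clear ih hpre hd hv; simp_all)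

-- ===== VERDICT (by name: the statement is the Claim_ definition above) =====
theorem regionCount_spec : Claim_equal_regionCount := by
  intro d _ hpre
  unfold Spec_regionCount regionCount regionCount_alt
  rw [foldA_eq d 0 0 0 0 0 0 0 hpre]
  simp
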